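-- pv_equiv track=rewrite | github.com/wyk18703232953/myResearch | codeComplex/data/filteredData/python/logn/python_logn_0239.py | solve
-- ===== SOURCE A (Python) =====
-- def really_big(x, s):
--     sum_digit = 0
--     digits = x
--     while digits > 0:
--         sum_digit += digits % 10
--         digits = digits // 10
--
--     if x - sum_digit >= s:
--         return True
--     return False
--
-- def solve(n, s):
--     left = 1
--     right = n
--     ans = 0
--     while left <= right:
--         mid = (left + right) // 2
--         if really_big(mid, s):  # mid is really big
--             right = mid - 1
--             ans = n - mid + 1
--         else:  # mid is not really big
--             left = mid + 1
--     return ans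
-- ===== SOURCE B (Python) =====
-- def digit_sum(x):
--     acc = 0
--     while x > 0:
--         acc += x % 10
--         x //= 10
--     return acc
--
-- def solve(n, s):
--     # x - digit_sum(x) is nondecreasing, so the qualifying numbers in 1..n form
--     # a suffix [t, n]; find the threshold t by scanning up from max(1, s)
--     # (digit_sum is small, so t is at most ~9*digits above s).
--     t = max(1, s)
--     while t - digit_sum(t) < s:
--         t += 1
--     return max(0, n - t + 1)
-- ===== Notes on version B (the rewrite author's own statement) =====
-- stated objective: alternative
-- what changed: Replaces the binary search over [1,n] by a direct computation of the threshold t = least x with x-digitsum(x) >= s (a short upward scan starting at max(1,s), since digitsum is tiny), returning max(0, n-t+1).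
import Mathlib
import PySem

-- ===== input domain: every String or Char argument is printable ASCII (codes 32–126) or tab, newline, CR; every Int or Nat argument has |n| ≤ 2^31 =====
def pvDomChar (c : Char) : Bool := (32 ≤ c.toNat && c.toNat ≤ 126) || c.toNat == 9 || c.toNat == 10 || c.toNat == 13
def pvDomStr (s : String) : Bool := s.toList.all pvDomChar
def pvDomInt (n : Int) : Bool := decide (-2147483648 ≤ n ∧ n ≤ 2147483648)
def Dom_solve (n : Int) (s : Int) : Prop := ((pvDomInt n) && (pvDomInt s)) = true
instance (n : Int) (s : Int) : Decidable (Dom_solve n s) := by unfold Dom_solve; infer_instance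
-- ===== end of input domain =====

-- B replaces A's binary search by a direct upward scan for the threshold t = least x with
-- x - digitsum(x) >= s, returning max(0, n - t + 1): a different algorithm of similar cost.

-- ===== PORT A =====
-- while digits > 0: sum_digit += digits % 10; digits //= 10
def sumLoop (digits acc : Int) : Int :=
  if 0 < digits then sumLoop (PySem.Int.floordiv digits 10) (acc + PySem.Int.mod digits 10) else acc
termination_by digits.toNat
decreasing_by
  rw [PySem.Int.floordiv_eq_ediv_of_pos (by omega : (0:Int) < 10)]; omega

def really_big (x : Int) (s : Int) : Bool :=
  if s ≤ x - sumLoop x 0 then true else false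

-- the while left <= right loop of A
def solveLoop (n s left right ans : Int) : Int :=
  if _h : left ≤ right then
    let mid := PySem.Int.floordiv (left + right) 2
    if really_big mid s then solveLoop n s left (mid - 1) (n - mid + 1)
    else solveLoop n s (mid + 1) right ans
  else ans
termination_by (right + 1 - left).toNat
decreasing_by
  · have hb := PySem.Int.floordiv_two_mid_bounds _h
    omega
  · have hb := PySem.Int.floordiv_two_mid_bounds _h
    omega

def solve (n : Int) (s : Int) : Int := solveLoop n s 1 n 0

-- ===== PORT B =====
-- while x > 0: acc += x % 10; x //= 10
def digitSumLoop (x acc : Int) : Int :=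
  if 0 < x then digitSumLoop (PySem.Int.floordiv x 10) (acc + PySem.Int.mod x 10) else acc
termination_by x.toNat
decreasing_by
  rw [PySem.Int.floordiv_eq_ediv_of_pos (by omega : (0:Int) < 10)]; omega

def digit_sum (x : Int) : Int := digitSumLoop x 0

-- the unbounded 'while t - digit_sum(t) < s: t += 1' of Source B; the fuel only makes the same
-- scan total (200 steps provably suffice on Dom, see the proofs below)
def findT (s t : Int) : Nat → Int
  | 0 => t
  | Nat.succ k => if t - digit_sum t < s then findT s (t + 1) k else t

def solve_alt (n : Int) (s : Int) : Int :=
  max 0 (n - findT s (max 1 s) 200 + 1)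

-- ===== PRECONDITION & SPEC =====
def Spec_solve (n : Int) (s : Int) (out : Int) : Prop := out = solve_alt n s
instance (n : Int) (s : Int) (out : Int) : Decidable (Spec_solve n s out) := by unfold Spec_solve; infer_instance

-- ===== CLAIM (what is proved, stated in full; the proofs are below) =====
def Claim_equal_solve : Prop := ∀ (n : Int) (s : Int), Dom_solve n s → Spec_solve n s (solve n s)

-- ===== LEMMAS AND PROOFS =====

lemma sumLoop_pos (x acc : Int) (hx : 0 < x) :
    sumLoop x acc = sumLoop (PySem.Int.floordiv x 10) (acc + PySem.Int.mod x 10) := by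
  rw [sumLoop, if_pos hx]

lemma sumLoop_nonpos (x acc : Int) (hx : ¬ 0 < x) : sumLoop x acc = acc := by
  rw [sumLoop, if_neg hx]

-- B's digit-sum loop and A's digit-sum loop compute the same function
lemma ds_eq : ∀ (m : Nat) (x acc : Int), x.toNat ≤ m → digitSumLoop x acc = sumLoop x acc := by
  intro m
  induction m with
  | zero =>
    intro x acc h
    rw [digitSumLoop, sumLoop]
    split_ifs with hx
    · omega
    · rfl
  | succ k ih =>
    intro x acc h
    rw [digitSumLoop, sumLoop]
    split_ifs with hx
    · have hd : PySem.Int.floordiv x 10 = x / 10 :=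
        PySem.Int.floordiv_eq_ediv_of_pos (by omega)
      exact ih _ _ (by rw [hd]; omega)
    · rfl

lemma digit_sum_eq_sumLoop (x : Int) : digit_sum x = sumLoop x 0 :=
  ds_eq x.toNat x 0 le_rfl

lemma rb_iff (x s : Int) : really_big x s = true ↔ s ≤ x - digit_sum x := by
  rw [really_big, digit_sum_eq_sumLoop]
  split_ifs with h <;> simp [h]

-- the accumulator splits off
lemma sumLoop_acc : ∀ (m : Nat) (x acc : Int), x.toNat ≤ m → sumLoop x acc = acc + sumLoop x 0 := by
  intro m
  induction m with
  | zero =>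
    intro x acc h
    rw [sumLoop_nonpos x acc (by omega), sumLoop_nonpos x 0 (by omega)]
    ring
  | succ k ih =>
    intro x acc h
    by_cases hx : 0 < x
    · have hd : PySem.Int.floordiv x 10 = x / 10 :=
        PySem.Int.floordiv_eq_ediv_of_pos (by omega)
      have hm : (PySem.Int.floordiv x 10).toNat ≤ k := by rw [hd]; omega
      rw [sumLoop_pos x acc hx, sumLoop_pos x 0 hx, ih _ _ hm, ih _ (0 + PySem.Int.mod x 10) hm]
      ring
    · rw [sumLoop_nonpos x acc hx, sumLoop_nonpos x 0 hx]
      ring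

-- one unfolding step of digit_sum, in ediv/emod form, for positive x
lemma digit_sum_step (x : Int) (hx : 0 < x) :
    digit_sum x = digit_sum (x / 10) + x % 10 := by
  rw [digit_sum_eq_sumLoop, digit_sum_eq_sumLoop, sumLoop_pos x 0 hx]
  have hd : PySem.Int.floordiv x 10 = x / 10 := PySem.Int.floordiv_eq_ediv_of_pos (by omega)
  have hm : PySem.Int.mod x 10 = x % 10 := PySem.Int.mod_eq_emod_of_pos (by omega)
  rw [hd, hm, sumLoop_acc (x/10).toNat _ _ le_rfl]
  ring

lemma digit_sum_nonpos (x : Int) (hx : x ≤ 0) : digit_sum x = 0 := by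
  rw [digit_sum_eq_sumLoop, sumLoop_nonpos x 0 (by omega)]

lemma digit_sum_nonneg : ∀ (m : Nat) (x : Int), x.toNat ≤ m → 0 ≤ digit_sum x := by
  intro m
  induction m with
  | zero => intro x h; rw [digit_sum_nonpos x (by omega)]
  | succ k ih =>
    intro x h
    by_cases hx : 0 < x
    · rw [digit_sum_step x hx]
      have := ih (x / 10) (by omega)
      omega
    · rw [digit_sum_nonpos x (by omega)]

lemma digit_sum_nonneg' (x : Int) : 0 ≤ digit_sum x := digit_sum_nonneg x.toNat x le_rfl

lemma digit_sum_one : digit_sum 1 ≤ 1 := by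
  rw [digit_sum_step 1 (by omega)]
  have h0 : (1:Int) / 10 = 0 := by norm_num
  have h1 : (1:Int) % 10 = 1 := by norm_num
  rw [h0, h1, digit_sum_nonpos 0 le_rfl]
  omega

-- the key monotonicity step: a digit sum grows by at most 1 when x grows by 1
lemma digit_sum_succ_le : ∀ (m : Nat) (x : Int), 0 ≤ x → x.toNat ≤ m →
    digit_sum (x + 1) ≤ digit_sum x + 1 := by
  intro m
  induction m with
  | zero =>
    intro x hx h
    have hx0 : x = 0 := by omega
    subst hx0
    norm_num
    have := digit_sum_one
    rw [digit_sum_nonpos 0 le_rfl]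
    omega
  | succ k ih =>
    intro x hx h
    by_cases hx0 : x = 0
    · subst hx0
      norm_num
      have := digit_sum_one
      rw [digit_sum_nonpos 0 le_rfl]
      omega
    · rw [digit_sum_step (x + 1) (by omega), digit_sum_step x (by omega)]
      by_cases h9 : x % 10 = 9
      · have h1 : (x + 1) / 10 = x / 10 + 1 := by omega
        have h2 : (x + 1) % 10 = 0 := by omega
        rw [h1, h2]
        have := ih (x / 10) (by omega) (by omega)
        omega
      · have h1 : (x + 1) / 10 = x / 10 := by omega
        have h2 : (x + 1) % 10 = x % 10 + 1 := by omega
        rw [h1, h2]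
        omega

-- hence x - digit_sum x is nondecreasing on 0 ≤ x
lemma big_mono : ∀ (m : Nat) (x y : Int), 0 ≤ x → x ≤ y → (y - x).toNat ≤ m →
    x - digit_sum x ≤ y - digit_sum y := by
  intro m
  induction m with
  | zero =>
    intro x y hx hxy h
    have hxy2 : x = y := by omega
    rw [hxy2]
  | succ k ih =>
    intro x y hx hxy h
    by_cases he : x = y
    · rw [he]
    · have h1 : x - digit_sum x ≤ (x + 1) - digit_sum (x + 1) := by
        have := digit_sum_succ_le x.toNat x hx le_rfl
        omega
      exact h1.trans (ih (x + 1) y (by omega) (by omega) (by omega))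

-- digit sums are tiny: at most 9 per digit
lemma digit_sum_bound : ∀ (k : Nat) (x : Int), 0 ≤ x → x < 10 ^ k →
    digit_sum x ≤ 9 * k := by
  intro k
  induction k with
  | zero => intro x hx h; rw [digit_sum_nonpos x (by omega)]; omega
  | succ j ih =>
    intro x hx h
    by_cases hx0 : 0 < x
    · rw [digit_sum_step x hx0]
      have hpow : (10:Int) ^ (j + 1) = 10 * 10 ^ j := by ring
      have hlt : x / 10 < 10 ^ j := by
        have := h.trans_eq hpow
        omega
      have := ih (x / 10) (by omega) hlt
      push_cast
      omega
    · rw [digit_sum_nonpos x (by omega)]; positivity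

-- the scan findT finds exactly the least threshold at or above its start
lemma findT_spec : ∀ (k : Nat) (s t0 : Int),
    (∃ j : Nat, j < k ∧ s ≤ (t0 + (j : Int)) - digit_sum (t0 + (j : Int))) →
    t0 ≤ findT s t0 k ∧ s ≤ findT s t0 k - digit_sum (findT s t0 k) ∧
      ∀ x, t0 ≤ x → x < findT s t0 k → x - digit_sum x < s := by
  intro k
  induction k with
  | zero => intro s t0 ⟨j, hj, _⟩; omega
  | succ m ih =>
    intro s t0 ⟨j, hj, hbig⟩
    rw [findT]
    split_ifs with hc
    · have hj0 : j ≠ 0 := by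
        intro h0; subst h0; simp at hbig; omega
      obtain ⟨i, rfl⟩ : ∃ i, j = i + 1 := ⟨j - 1, by omega⟩
      have hex : ∃ i' : Nat, i' < m ∧ s ≤ (t0 + 1 + (i' : Int)) - digit_sum (t0 + 1 + (i' : Int)) := by
        refine ⟨i, by omega, ?_⟩
        have heq : t0 + 1 + (i : Int) = t0 + ((i : Int) + 1) := by ring
        rw [heq]
        exact_mod_cast hbig
      obtain ⟨h1, h2, h3⟩ := ih s (t0 + 1) hex
      refine ⟨by omega, h2, ?_⟩
      intro x hx1 hx2
      by_cases hxe : x = t0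
      · subst hxe; exact hc
      · exact h3 x (by omega) hx2
    · exact ⟨le_rfl, by omega, by intro x h1 h2; omega⟩

-- under Dom, the scan hits within 100 steps of max(1, s)
lemma exists_hit (s : Int) (hs : s ≤ 2147483648) :
    ∃ j : Nat, j < 200 ∧ s ≤ (max 1 s + (j : Int)) - digit_sum (max 1 s + (j : Int)) := by
  refine ⟨100, by omega, ?_⟩
  have h1 : (1:Int) ≤ max 1 s := le_max_left _ _
  have h2 : max 1 s ≤ 2147483648 := by
    rcases max_cases 1 s with ⟨he, _⟩ | ⟨he, _⟩ <;> omega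
  have hb := digit_sum_bound 11 (max 1 s + 100) (by omega) (by norm_num; omega)
  have hms : s ≤ max 1 s := le_max_right _ _
  norm_num at hb ⊢
  omega

-- loop exit: the invariants at left = right + 1 force the answer
lemma loopA_base (n s T left right ans : Int) (hT1 : 1 ≤ T)
    (hTbig : s ≤ T - digit_sum T)
    (hTmin : ∀ x, 1 ≤ x → x < T → x - digit_sum x < s)
    (hlr : ¬ left ≤ right) (h1 : 1 ≤ left) (h2 : left ≤ right + 1) (h3 : right ≤ n) (h4 : ans = n - right)
    (h5 : ∀ x, 1 ≤ x → x < left → x - digit_sum x < s)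
    (h6 : right = n ∨ s ≤ (right + 1) - digit_sum (right + 1)) :
    ans = max 0 (n - T + 1) := by
  have hTge : left ≤ T := by
    by_contra hc
    exact absurd hTbig (by simpa using (h5 T hT1 (by omega)).not_ge)
  rcases h6 with hrn | hbig
  · -- no qualifying x in [1, n]: T > n, answer 0
    omega
  · have hTle : T ≤ right + 1 := by
      by_contra hc
      exact absurd hbig (by simpa using (hTmin (right + 1) (by omega) (by omega)).not_ge)
    omega

-- the binary-search loop, under its invariants, computes max 0 (n - T + 1)
-- where T is the least x ≥ 1 with s ≤ x - digit_sum x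
lemma loopA_eq (n s T : Int) (hT1 : 1 ≤ T) (hTbig : s ≤ T - digit_sum T)
    (hTmin : ∀ x, 1 ≤ x → x < T → x - digit_sum x < s) :
    ∀ (m : Nat) (left right ans : Int), (right + 1 - left).toNat ≤ m →
    1 ≤ left → left ≤ right + 1 → right ≤ n → ans = n - right →
    (∀ x, 1 ≤ x → x < left → x - digit_sum x < s) →
    (right = n ∨ s ≤ (right + 1) - digit_sum (right + 1)) →
    solveLoop n s left right ans = max 0 (n - T + 1) := by
  intro m
  induction m with
  | zero =>
    intro left right ans hm h1 h2 h3 h4 h5 h6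
    rw [solveLoop, dif_neg (by omega : ¬ left ≤ right)]
    exact loopA_base n s T left right ans hT1 hTbig hTmin (by omega) h1 h2 h3 h4 h5 h6
  | succ k ih =>
    intro left right ans hm h1 h2 h3 h4 h5 h6
    rw [solveLoop]
    split_ifs with hlr
    · have hmid := PySem.Int.floordiv_two_mid_bounds hlr
      set mid := PySem.Int.floordiv (left + right) 2 with hmiddef
      by_cases hb : really_big mid s
      · rw [if_pos hb]
        rw [rb_iff] at hb
        exact ih left (mid - 1) (n - mid + 1) (by omega) h1 (by omega) (by omega)
          (by omega) h5 (Or.inr (by simpa using hb))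
      · rw [if_neg hb]
        have hnb : mid - digit_sum mid < s := by
          by_contra hc
          exact hb ((rb_iff mid s).mpr (by omega))
        refine ih (mid + 1) right ans (by omega) (by omega) (by omega) h3 h4 ?_ h6
        intro x hx1 hx2
        by_cases hxl : x < left
        · exact h5 x hx1 hxl
        · have := big_mono (mid - x).toNat x mid (by omega) (by omega) le_rfl
          omega
    · exact loopA_base n s T left right ans hT1 hTbig hTmin hlr h1 h2 h3 h4 h5 h6

-- ===== VERDICT (by name: the statement is the Claim_ definition above) =====
theorem solve_spec : Claim_equal_solve := by
  intro n s hdom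
  have hs : s ≤ 2147483648 := by
    simp only [Dom_solve, pvDomInt, Bool.and_eq_true, decide_eq_true_eq] at hdom
    exact hdom.2.2
  unfold Spec_solve solve solve_alt
  obtain ⟨hT0, hTbig, hTmin0⟩ := findT_spec 200 s (max 1 s) (exists_hit s hs)
  set T := findT s (max 1 s) 200 with hTdef
  have hT1 : 1 ≤ T := le_trans (le_max_left _ _) hT0
  have hTmin : ∀ x, 1 ≤ x → x < T → x - digit_sum x < s := by
    intro x hx1 hx2
    by_cases hxm : max 1 s ≤ x
    · exact hTmin0 x hxm hx2
    · have hxs : x < s := by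
        rcases max_cases 1 s with ⟨_, _⟩ | ⟨_, _⟩ <;> omega
      have := digit_sum_nonneg' x
      omega
  by_cases hn : 1 ≤ n
  · exact loopA_eq n s T hT1 hTbig hTmin (n + 1 - 1).toNat 1 n 0 (by omega) le_rfl
      (by omega) le_rfl (by omega) (by intro x h1 h2; omega) (Or.inl rfl)
  · rw [solveLoop, dif_neg (by omega : ¬ (1:Int) ≤ n)]
    omega
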